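-- pv_equiv track=rewrite | github.com/MegaManSec/sarif-to-md | script.py | md_inline_code
-- ===== SOURCE A (Python) =====
-- def md_inline_code(s: str) -> str:
--     """
--     Safely wrap `s` as inline code inside a Markdown table:
--     - escape pipe characters
--     - choose a backtick fence length not present in s
--     - fallback to <code> for pathological cases
--     """
--     content = s.replace("|", r"\|")
--     for n in (1, 2, 3, 4):
--         fence = "`" * n
--         if fence not in content:
--             return f"{fence}{content}{fence}"
--     # Fallback: HTML-escape minimal chars
--     esc = (content.replace("&", "&amp;")
--                     .replace("<", "&lt;")
--                     .replace(">", "&gt;"))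
--     return f"<code>{esc}</code>"
-- ===== SOURCE B (Python) =====
-- def md_inline_code(s: str) -> str:
--     content = s.replace("|", "\\|")
--     cur = 0
--     mx = 0
--     for ch in content:
--         if ch == "`":
--             cur += 1
--             if cur > mx:
--                 mx = cur
--         else:
--             cur = 0
--     if mx >= 4:
--         esc = (content.replace("&", "&amp;")
--                       .replace("<", "&lt;")
--                       .replace(">", "&gt;"))
--         return "<code>" + esc + "</code>"
--     fence = "`" * (mx + 1)
--     return fence + content + fence
-- ===== Notes on version B (the rewrite author's own statement) =====
-- stated objective: alternative
-- what changed: Instead of testing fences of length 1..4 for substring membership, B makes one pass over the escaped content tracking the longest run of backticks and derives the fence length (max run + 1) or the <code> fallback (max run >= 4) directly from that scan.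
import Mathlib
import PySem

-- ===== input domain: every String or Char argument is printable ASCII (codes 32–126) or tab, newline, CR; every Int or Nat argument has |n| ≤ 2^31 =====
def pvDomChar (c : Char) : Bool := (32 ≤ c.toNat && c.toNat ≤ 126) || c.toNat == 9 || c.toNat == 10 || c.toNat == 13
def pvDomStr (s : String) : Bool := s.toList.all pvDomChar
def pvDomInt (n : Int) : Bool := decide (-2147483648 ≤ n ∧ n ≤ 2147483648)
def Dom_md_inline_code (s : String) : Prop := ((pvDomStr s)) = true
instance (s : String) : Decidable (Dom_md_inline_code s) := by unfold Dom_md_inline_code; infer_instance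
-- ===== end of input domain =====

-- B replaces A's four substring-membership fence probes by a single pass tracking the longest
-- backtick run (alternative decomposition, same asymptotic cost).


-- ===== PORT A =====
def md_inline_code (s : String) : String :=
  let content := PySem.Str.replace s "|" "\\|"
  if !(PySem.Str.isIn "`" content) then "`" ++ content ++ "`"
  else if !(PySem.Str.isIn "``" content) then "``" ++ content ++ "``"
  else if !(PySem.Str.isIn "```" content) then "```" ++ content ++ "```"
  else if !(PySem.Str.isIn "````" content) then "````" ++ content ++ "````"
  else
    let esc := PySem.Str.replace (PySem.Str.replace (PySem.Str.replace content "&" "&amp;") "<" "&lt;") ">" "&gt;"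
    "<code>" ++ esc ++ "</code>"

-- ===== PORT B =====
-- loop body of B's single pass: (current run, max run)
def mdAltStep (p : Nat × Nat) (c : Char) : Nat × Nat :=
  if c == '`' then
    let cur := p.1 + 1
    (cur, if cur > p.2 then cur else p.2)
  else (0, p.2)

def md_inline_code_alt (s : String) : String :=
  let content := PySem.Str.replace s "|" "\\|"
  let mx := (content.toList.foldl mdAltStep (0, 0)).2
  if mx ≥ 4 then
    let esc := PySem.Str.replace (PySem.Str.replace (PySem.Str.replace content "&" "&amp;") "<" "&lt;") ">" "&gt;"
    "<code>" ++ esc ++ "</code>"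
  else
    let fence := String.ofList (List.replicate (mx + 1) '`')
    fence ++ content ++ fence

-- ===== PRECONDITION & SPEC =====
def Spec_md_inline_code (s : String) (out : String) : Prop := out = md_inline_code_alt s
instance (s : String) (out : String) : Decidable (Spec_md_inline_code s out) := by unfold Spec_md_inline_code; infer_instance

-- ===== CLAIM (what is proved, stated in full; the proofs are below) =====
def Claim_equal_md_inline_code : Prop := ∀ (s : String), Dom_md_inline_code s → Spec_md_inline_code s (md_inline_code s)

-- ===== LEMMAS AND PROOFS =====

-- "max backtick-run" seen from a current run of length `cur`
def pvR : Nat → List Char → Nat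
  | cur, [] => cur
  | cur, c :: t => if c = '`' then pvR (cur + 1) t else max cur (pvR 0 t)

theorem pvR_ge (cur : Nat) (l : List Char) : cur ≤ pvR cur l := by
  induction l generalizing cur with
  | nil => simp [pvR]
  | cons c t ih =>
    simp only [pvR]
    split
    · exact le_trans (Nat.le_succ cur) (ih (cur + 1))
    · exact le_max_left _ _

theorem pvR_mono {a b : Nat} (h : a ≤ b) (l : List Char) : pvR a l ≤ pvR b l := by
  induction l generalizing a b with
  | nil => simpa [pvR]
  | cons c t ih =>
    simp only [pvR]
    split
    · exact ih (Nat.succ_le_succ h)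
    · exact max_le_max h le_rfl

theorem pvR_tail (c : Char) (t : List Char) : pvR 0 t ≤ pvR 0 (c :: t) := by
  simp only [pvR]
  split
  · exact pvR_mono (Nat.zero_le 1) t
  · exact le_max_right _ _

theorem pvR_prefix {n : Nat} {l : List Char} (cur : Nat)
    (h : List.replicate n '`' <+: l) : cur + n ≤ pvR cur l := by
  induction n generalizing cur l with
  | zero => simpa using pvR_ge cur l
  | succ m ih =>
    rcases h with ⟨rest, hrest⟩
    rw [List.replicate_succ, List.cons_append] at hrest
    subst hrest
    simpa [pvR, Nat.add_comm, Nat.add_left_comm, Nat.add_assoc] using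
      ih (cur + 1) ⟨rest, rfl⟩

theorem pvR_of_infix {n : Nat} {l : List Char}
    (h : List.replicate n '`' <:+: l) : n ≤ pvR 0 l := by
  induction l with
  | nil =>
    have h0 := List.eq_nil_of_infix_nil h
    have : n = 0 := by simpa [List.replicate_eq_nil_iff] using h0
    simp [this, pvR]
  | cons c t ih =>
    rcases (List.infix_cons_iff).1 h with hp | hi
    · simpa using pvR_prefix 0 hp
    · exact le_trans (ih hi) (pvR_tail c t)

theorem pvR_realized (l : List Char) (cur : Nat) :
    List.replicate (pvR cur l) '`' <:+: (List.replicate cur '`' ++ l) := by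
  induction l generalizing cur with
  | nil => simp [pvR]
  | cons c t ih =>
    simp only [pvR]
    split
    · rename_i hc
      subst hc
      have : List.replicate cur '`' ++ '`' :: t = List.replicate (cur + 1) '`' ++ t := by
        simp [List.replicate_succ']
      rw [this]
      exact ih (cur + 1)
    · rcases Nat.le_total (pvR 0 t) cur with h | h
      · rw [max_eq_left h]
        exact ((List.prefix_append _ _).isInfix)
      · rw [max_eq_right h]
        have := ih 0
        simp only [List.replicate_zero, List.nil_append] at this
        exact this.trans ((List.suffix_cons c t).trans (List.suffix_append _ _)).isInfix

theorem isIn_replicate (n : Nat) (l : List Char) :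
    PySem.Chars.isIn (List.replicate n '`') l = decide (n ≤ pvR 0 l) := by
  by_cases h : n ≤ pvR 0 l
  · simp only [h, decide_true]
    rw [PySem.Chars.isIn_iff_infix]
    have hR := pvR_realized l 0
    simp only [List.replicate_zero, List.nil_append] at hR
    exact List.IsInfix.trans ⟨[], List.replicate (pvR 0 l - n) '`', by
      rw [List.nil_append, List.replicate_append_replicate]
      congr 1; omega⟩ hR
  · simp only [h, decide_false]
    rw [PySem.Chars.isIn_eq_false_iff]
    exact fun hinf => h (pvR_of_infix hinf)

theorem foldl_mdAltStep (l : List Char) (cur mx : Nat) (h : cur ≤ mx) :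
    (l.foldl mdAltStep (cur, mx)).2 = max mx (pvR cur l) := by
  induction l generalizing cur mx with
  | nil => simp [pvR, Nat.max_eq_left h]
  | cons c t ih =>
    simp only [List.foldl_cons, mdAltStep, pvR]
    by_cases hc : c = '`'
    · simp only [hc, beq_self_eq_true, if_pos]
      have hle : cur + 1 ≤ if cur + 1 > mx then cur + 1 else mx := by
        split <;> omega
      rw [ih (cur + 1) _ hle]
      have hR := pvR_ge (cur + 1) t
      have : (if cur + 1 > mx then cur + 1 else mx) = max mx (cur + 1) := by
        split <;> omega
      rw [this]
      omega
    · simp only [hc, if_false, beq_iff_eq]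
      rw [ih 0 mx (Nat.zero_le mx)]
      omega

-- ===== VERDICT (by name: the statement is the Claim_ definition above) =====
theorem md_inline_code_spec : Claim_equal_md_inline_code := by
  intro s _
  unfold Spec_md_inline_code md_inline_code md_inline_code_alt
  simp only []
  set content := PySem.Str.replace s "|" "\\|" with hcontent
  have hfold : (content.toList.foldl mdAltStep (0, 0)).2 = pvR 0 content.toList := by
    rw [foldl_mdAltStep _ 0 0 le_rfl]; omega
  have hIn : ∀ n : Nat, PySem.Str.isIn (String.ofList (List.replicate n '`')) content
      = decide (n ≤ pvR 0 content.toList) := by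
    intro n
    rw [show PySem.Str.isIn (String.ofList (List.replicate n '`')) content
        = PySem.Chars.isIn (List.replicate n '`') content.toList from by
      simp [PySem.Str.isIn, String.toList_ofList]]
    exact isIn_replicate n content.toList
  have h1 := hIn 1; have h2 := hIn 2; have h3 := hIn 3; have h4 := hIn 4
  simp only [show String.ofList (List.replicate 1 '`') = "`" from by decide,
    show String.ofList (List.replicate 2 '`') = "``" from by decide,
    show String.ofList (List.replicate 3 '`') = "```" from by decide,
    show String.ofList (List.replicate 4 '`') = "````" from by decide] at h1 h2 h3 h4
  rw [hfold, h1, h2, h3, h4]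
  set M := pvR 0 content.toList with hM
  by_cases hb : 4 ≤ M
  · simp [hb, show 1 ≤ M by omega, show 2 ≤ M by omega, show 3 ≤ M by omega]
  · have hM3 : M ≤ 3 := by omega
    interval_cases M <;>
      simp [show (String.ofList ['`'] : String) = "`" from by decide,
        show (String.ofList ['`','`'] : String) = "``" from by decide,
        show (String.ofList ['`','`','`'] : String) = "```" from by decide,
        show (String.ofList ['`','`','`','`'] : String) = "````" from by decide]
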